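-- pv_equiv track=rewrite | github.com/vatine/sressays | dupes.py | count_non_dupes_on2
-- ===== SOURCE A (Python) =====
-- def count_non_dupes_on2(seq):
--     """Return the count of unique elements in the sequence.
--        Here, unique means that for any two elements e1, e2 in the sequencee, e1 != e2.
--        This uses an inefficient, but "obviously correct" O(n ** 2) algorithm.
--     """
--
--     l = len(seq)
--
--     dupes = 0
--     for ix1 in range(l):
--         for ix2 in range(ix1 + 1, l):
--             if seq[ix1] == seq[ix2]:
--                 dupes += 1
--
--     return l - dupes
-- ===== SOURCE B (Python) =====
-- def count_non_dupes_on2(seq):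
--     """Return len(seq) minus the number of equal unordered pairs, in one pass:
--     for each element, add how many equal elements were seen before it."""
--     seen = {}
--     dupes = 0
--     for x in seq:
--         c = seen.get(x, 0)
--         dupes += c
--         seen[x] = c + 1
--     return len(seq) - dupes
-- ===== Notes on version B (the rewrite author's own statement) =====
-- stated objective: faster
-- what changed: Replaced the O(n^2) nested index loops that test every pair with a single pass keeping a dict of occurrence counts: each element contributes the number of equal elements seen before it.
import Mathlib
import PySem

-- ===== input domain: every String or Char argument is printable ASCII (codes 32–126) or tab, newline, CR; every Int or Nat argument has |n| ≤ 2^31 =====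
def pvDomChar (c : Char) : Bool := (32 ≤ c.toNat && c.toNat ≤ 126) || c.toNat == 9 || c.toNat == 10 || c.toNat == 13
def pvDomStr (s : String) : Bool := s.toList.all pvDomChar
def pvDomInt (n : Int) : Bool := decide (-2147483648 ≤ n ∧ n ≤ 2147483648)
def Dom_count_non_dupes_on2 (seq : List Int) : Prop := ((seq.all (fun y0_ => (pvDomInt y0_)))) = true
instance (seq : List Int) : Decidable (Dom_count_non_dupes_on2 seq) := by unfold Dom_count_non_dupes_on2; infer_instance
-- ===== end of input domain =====

-- B replaces A's O(n^2) nested index loops with a single pass over the list keeping a dict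
-- of occurrence counts (each element adds the number of equal elements seen before it).

-- ===== PORT A =====
def count_non_dupes_on2 (seq : List Int) : Int :=
  let l : Int := seq.length
  let dupes : Int :=
    (PySem.List.pyRange 0 l 1).foldl (fun dupes ix1 =>
      (PySem.List.pyRange (ix1 + 1) l 1).foldl (fun dupes ix2 =>
        if PySem.List.pyGetD seq ix1 0 = PySem.List.pyGetD seq ix2 0 then dupes + 1 else dupes)
        dupes) 0
  l - dupes

-- ===== PORT B =====
def count_non_dupes_on2_alt (seq : List Int) : Int :=
  let st : Int × PySem.Dict Int Int :=
    seq.foldl (fun st x =>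
      let c := st.2.getD x 0
      (st.1 + c, st.2.insert x (c + 1))) (0, PySem.Dict.empty)
  (seq.length : Int) - st.1

-- ===== PRECONDITION & SPEC =====
def Spec_count_non_dupes_on2 (seq : List Int) (out : Int) : Prop := out = count_non_dupes_on2_alt seq
instance (seq : List Int) (out : Int) : Decidable (Spec_count_non_dupes_on2 seq out) := by unfold Spec_count_non_dupes_on2; infer_instance

-- ===== CLAIM (what is proved, stated in full; the proofs are below) =====
def Claim_equal_count_non_dupes_on2 : Prop := ∀ (seq : List Int), Dom_count_non_dupes_on2 seq → Spec_count_non_dupes_on2 seq (count_non_dupes_on2 seq)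

-- ===== LEMMAS AND PROOFS =====

-- number of equal unordered pairs, counted by first position
def pairsA : List Int → Int
  | [] => 0
  | x :: xs => (xs.count x : Int) + pairsA xs

-- A-side reference sum: for each index k, matches of seq[k] strictly after k
def sumA (seq : List Int) : Int :=
  ((List.range seq.length).map (fun k => ((seq.drop (k + 1)).count (seq.getD k 0) : Int))).sum

lemma sumA_eq_pairsA (seq : List Int) : sumA seq = pairsA seq := by
  induction seq with
  | nil => simp [sumA, pairsA]
  | cons x xs ih =>
    unfold sumA pairsA
    rw [List.length_cons, List.range_succ_eq_map]
    simp only [List.map_cons, List.map_map, List.sum_cons, Function.comp_def,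
      Nat.succ_eq_add_one]
    have : ((List.range xs.length).map fun k =>
        (((x :: xs).drop (k + 1 + 1)).count ((x :: xs).getD (k + 1) 0) : Int)) =
        (List.range xs.length).map fun k => ((xs.drop (k + 1)).count (xs.getD k 0) : Int) := by
      apply List.map_congr_left
      intro k _
      simp [List.getD]
    rw [this]
    simp [sumA, List.getD] at ih ⊢
    omega

lemma countP_eq_count (seq : List Int) (v : Int) :
    seq.countP (fun x => decide (v = x)) = seq.count v := by
  rw [List.count]
  congr 1
  funext x
  exact (decide_eq_decide.mpr eq_comm).symm

lemma countA_eq_sumA (seq : List Int) :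
    (PySem.List.pyRange 0 (seq.length : Int) 1).foldl (fun dupes ix1 =>
      (PySem.List.pyRange (ix1 + 1) (seq.length : Int) 1).foldl (fun dupes ix2 =>
        if PySem.List.pyGetD seq ix1 0 = PySem.List.pyGetD seq ix2 0 then dupes + 1 else dupes)
        dupes) 0 = sumA seq := by
  rw [PySem.List.foldl_congr_mem
    (l := PySem.List.pyRange 0 (seq.length : Int) 1) (init := (0:Int))
    (f := fun dupes ix1 =>
      (PySem.List.pyRange (ix1 + 1) (seq.length : Int) 1).foldl (fun dupes ix2 =>
        if PySem.List.pyGetD seq ix1 0 = PySem.List.pyGetD seq ix2 0 then dupes + 1 else dupes)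
        dupes)
    (g := fun acc ix1 => acc + ((seq.drop (ix1 + 1).toNat).count (PySem.List.pyGetD seq ix1 0) : Int))
    (by
      intro acc ix1 hmem
      beta_reduce
      have h0 : (0:Int) ≤ ix1 + 1 := by
        have := (PySem.List.mem_pyRange_one.mp hmem).1; omega
      rw [PySem.List.foldl_pyRange_pyGetD' (xs := seq) (d := 0)
        (f := fun d y => if PySem.List.pyGetD seq ix1 0 = y then d + 1 else d)
        (init := acc) (a := ix1 + 1) h0]
      rw [PySem.List.foldl_ite_add_one, countP_eq_count])]
  rw [PySem.List.foldl_add]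
  rw [PySem.List.pyRange_zero_nat]
  rw [List.map_map]
  unfold sumA
  rw [List.map_congr_left (fun k hk => by
    simp only [Function.comp_apply, PySem.List.pyGetD_natCast]
    norm_num
    rfl)]
  simp

-- B-side: abstract the dict to a count function
def pairsF (c : Int → Int) : List Int → Int
  | [] => 0
  | x :: xs => c x + pairsF (fun y => if y = x then c x + 1 else c y) xs

lemma map_if_add_one_sum (xs : List Int) (c : Int → Int) (x : Int) :
    (xs.map (fun y => if y = x then c x + 1 else c y)).sum = (xs.map c).sum + xs.count x := by
  induction xs with
  | nil => simp
  | cons z zs ih =>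
    by_cases hz : z = x
    · subst hz; simp [ih]; omega
    · simp [hz, ih]; omega

lemma pairsF_eq (xs : List Int) (c : Int → Int) :
    pairsF c xs = pairsA xs + (xs.map c).sum := by
  induction xs generalizing c with
  | nil => simp [pairsF, pairsA]
  | cons x zs ih =>
    unfold pairsF pairsA
    rw [ih, map_if_add_one_sum]
    simp
    omega

lemma foldl_B (xs : List Int) (d : Int) (seen : PySem.Dict Int Int) :
    (xs.foldl (fun st x =>
      let c := st.2.getD x 0
      (st.1 + c, st.2.insert x (c + 1))) (d, seen)).1
      = d + pairsF (fun y => seen.getD y 0) xs := by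
  induction xs generalizing d seen with
  | nil => simp [pairsF]
  | cons x zs ih =>
    simp only [List.foldl_cons]
    rw [ih]
    have hc : (fun y => (seen.insert x (seen.getD x 0 + 1)).getD y 0)
        = (fun y => if y = x then seen.getD x 0 + 1 else seen.getD y 0) :=
      funext fun y => by rw [PySem.Dict.getD_insert]
    simp only [pairsF]
    rw [hc]
    ring

-- ===== VERDICT (by name: the statement is the Claim_ definition above) =====
theorem count_non_dupes_on2_spec : Claim_equal_count_non_dupes_on2 := by
  intro seq _
  unfold Spec_count_non_dupes_on2 count_non_dupes_on2 count_non_dupes_on2_alt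
  simp only []
  rw [countA_eq_sumA, sumA_eq_pairsA, foldl_B]
  have : pairsF (fun y => (PySem.Dict.empty : PySem.Dict Int Int).getD y 0) seq = pairsA seq := by
    rw [pairsF_eq]
    simp [PySem.Dict.getD_empty]
  rw [this]
  ring
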